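-- pv_equiv track=rewrite | github.com/Wojti-7/logia | Zadania/logia18_zad2.py | neon
-- ===== SOURCE A (Python) =====
-- def neon(t):
--     najwieksza = 0
--     for i in range(0, len(t)-1, 1):
--         for j in range(i+1, len(t), 1):
--             w = t[i] + t[j] + (2*(j-i))
--             if (w > najwieksza):
--                 najwieksza = w
--     return najwieksza
-- ===== SOURCE B (Python) =====
-- def neon(t):
--     # w = t[i]+t[j]+2*(j-i) = (t[i]-2*i) + (t[j]+2*j); one pass keeping the
--     # best prefix value of t[i]-2*i, answer floored at 0.
--     best = 0
--     pref = None
--     for j, x in enumerate(t):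
--         if pref is not None:
--             cand = pref + x + 2 * j
--             if cand > best:
--                 best = cand
--         v = x - 2 * j
--         if pref is None or v > pref:
--             pref = v
--     return best
-- ===== Notes on version B (the rewrite author's own statement) =====
-- stated objective: faster
-- what changed: Replaces the O(n^2) double loop over index pairs by a single pass that decomposes t[i]+t[j]+2*(j-i) as (t[i]-2i)+(t[j]+2j) and tracks the running maximum of t[i]-2i.
import Mathlib
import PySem

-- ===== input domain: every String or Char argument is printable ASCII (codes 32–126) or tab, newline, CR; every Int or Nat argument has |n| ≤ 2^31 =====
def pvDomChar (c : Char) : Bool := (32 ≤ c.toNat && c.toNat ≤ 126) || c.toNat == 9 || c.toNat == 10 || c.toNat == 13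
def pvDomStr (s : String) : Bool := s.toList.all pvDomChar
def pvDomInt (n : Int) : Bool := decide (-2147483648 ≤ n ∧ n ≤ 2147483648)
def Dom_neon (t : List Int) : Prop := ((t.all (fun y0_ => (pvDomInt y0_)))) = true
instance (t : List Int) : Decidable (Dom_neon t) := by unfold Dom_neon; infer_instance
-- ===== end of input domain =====

-- B replaces A's O(n^2) double loop by one pass: t[i]+t[j]+2(j-i) = (t[i]-2i)+(t[j]+2j),
-- so it tracks the running maximum of t[i]-2i; equal return value proved below.

-- ===== PORT A =====
def neon (t : List Int) : Int :=
  (PySem.List.pyRange 0 ((t.length : Int) - 1) 1).foldl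
    (fun naj i =>
      (PySem.List.pyRange (i + 1) (t.length : Int) 1).foldl
        (fun naj j =>
          let w := PySem.List.pyGetD t i 0 + PySem.List.pyGetD t j 0 + 2 * (j - i)
          if w > naj then w else naj)
        naj)
    0

-- ===== PORT B =====
def neonStep (s : Int × Option Int) (p : Int × Int) : Int × Option Int :=
  match s, p with
  | (best, pref), (j, x) =>
    let best :=
      match pref with
      | some pv => let cand := pv + x + 2 * j; if cand > best then cand else best
      | none => best
    let v := x - 2 * j
    let pref :=
      match pref with
      | none => some v
      | some pv => if v > pv then some v else some pv
    (best, pref)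

def neon_alt (t : List Int) : Int :=
  ((PySem.List.enumerate t 0).foldl neonStep (0, none)).1

-- ===== PRECONDITION & SPEC =====
def Spec_neon (t : List Int) (out : Int) : Prop := out = neon_alt t
instance (t : List Int) (out : Int) : Decidable (Spec_neon t out) := by unfold Spec_neon; infer_instance

-- ===== CLAIM (what is proved, stated in full; the proofs are below) =====
def Claim_equal_neon : Prop := ∀ (t : List Int), Dom_neon t → Spec_neon t (neon t)

-- ===== LEMMAS AND PROOFS =====

-- K xs = max over positions k of (xs[k] + 2*k), none on the empty list
def K : List Int → Option Int
  | [] => none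
  | x :: xs => some (match K xs with | none => x | some m => max x (m + 2))

-- reference recursion: carry c = max over already-seen i of t[i]+2*(pos-i)
def SS : List Int → Option Int → Int → Int
  | [], _, best => best
  | x :: xs, none, best => SS xs (some (x + 2)) best
  | x :: xs, some c, best => SS xs (some (max c x + 2)) (max best (c + x))

-- index-free form of A's inner loop (d = 2*(j-i) for the first j)
def innerF (x : Int) : List Int → Int → Int → Int
  | [], _, a => a
  | y :: ys, d, a => innerF x ys (d + 2) (max a (x + y + d))

-- index-free form of A's outer loop
def AF : List Int → Int → Int
  | [], a => a
  | x :: xs, a => AF xs (innerF x xs 2 a)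

theorem SS_thread (xs : List Int) : ∀ (c : Option Int) (b v : Int),
    SS xs c (max b v) = max (SS xs c b) v := by
  induction xs with
  | nil => intro c b v; simp [SS]
  | cons x xs ih =>
    intro c b v
    cases c with
    | none => simp [SS, ih]
    | some c =>
      simp only [SS]
      rw [show max (max b v) (c + x) = max (max b (c + x)) v by
        apply le_antisymm <;> simp [le_max_iff, max_le_iff] <;> omega, ih]

theorem SS_some (xs : List Int) : ∀ (c b : Int),
    SS xs (some c) b =
      match K xs with
      | none => SS xs none b
      | some k => max (SS xs none b) (c + k) := by
  induction xs with
  | nil => intro c b; simp [SS, K]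
  | cons x xs ih =>
    intro c b
    simp only [SS, K]
    rw [ih (max c x + 2) (max b (c + x)), ih (x + 2) b]
    cases hK : K xs with
    | none => simp [SS_thread]
    | some k =>
      simp only [SS_thread]
      apply le_antisymm <;> simp [le_max_iff, max_le_iff] <;> omega

theorem innerF_K (x : Int) (xs : List Int) : ∀ (d a : Int),
    innerF x xs d a =
      match K xs with
      | none => a
      | some k => max a (x + d + k) := by
  induction xs with
  | nil => intro d a; simp [innerF, K]
  | cons y ys ih =>
    intro d a
    simp only [innerF, K]
    rw [ih]
    cases hK : K ys with
    | none => simp; ring_nf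
    | some k =>
      apply le_antisymm <;> simp [le_max_iff, max_le_iff] <;> omega

theorem innerF_thread (x : Int) (xs : List Int) (d a v : Int) :
    innerF x xs d (max a v) = max (innerF x xs d a) v := by
  rw [innerF_K, innerF_K]
  cases K xs with
  | none => rfl
  | some k => apply le_antisymm <;> simp [le_max_iff, max_le_iff] <;> omega

theorem AF_thread (xs : List Int) : ∀ (a v : Int),
    AF xs (max a v) = max (AF xs a) v := by
  induction xs with
  | nil => intro a v; simp [AF]
  | cons x xs ih => intro a v; simp only [AF, innerF_thread, ih]

theorem SS_eq_AF (t : List Int) : SS t none 0 = AF t 0 := by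
  induction t with
  | nil => rfl
  | cons x xs ih =>
    show SS xs (some (x + 2)) 0 = AF xs (innerF x xs 2 0)
    rw [SS_some, innerF_K]
    cases K xs with
    | none => exact ih
    | some k =>
      show max (SS xs none 0) (x + 2 + k) = AF xs (max 0 (x + 2 + k))
      rw [AF_thread xs 0 (x + 2 + k), ih]

theorem B_inv (xs : List Int) : ∀ (j best : Int) (pref : Option Int),
    ((PySem.List.enumerate xs j).foldl neonStep (best, pref)).1 =
      SS xs (pref.map (fun p => p + 2 * j)) best := by
  induction xs with
  | nil => intro j best pref; cases pref <;> simp [PySem.List.enumerate_nil, SS]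
  | cons x xs ih =>
    intro j best pref
    rw [PySem.List.enumerate_cons, List.foldl_cons]
    cases pref with
    | none =>
      simp only [neonStep, Option.map_none, SS]
      rw [ih, Option.map_some]
      have harg : x - 2 * j + 2 * (j + 1) = x + 2 := by ring
      rw [harg]
    | some p =>
      simp only [neonStep, Option.map_some, SS]
      rw [ih]
      have h1 : Option.map (fun p => p + 2 * (j + 1))
            (if x - 2 * j > p then some (x - 2 * j) else some p)
          = some (max (p + 2 * j) x + 2) := by
        split_ifs with h <;> simp [max_def] <;> omega
      have h2 : (if p + x + 2 * j > best then p + x + 2 * j else best)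
          = max best (p + 2 * j + x) := by
        split_ifs with h <;> simp [max_def] <;> omega
      rw [h1, h2]

-- A's inner loop over j ∈ [c, len t) equals innerF on the suffix t.drop c
theorem drop_cons_facts {t ys : List Int} {y : Int} {n : Nat} (h : t.drop n = y :: ys) :
    n < t.length ∧ t[n]? = some y ∧ t.drop (n + 1) = ys := by
  have hlt : n < t.length := by
    by_contra hge
    rw [List.drop_eq_nil_iff.2 (by omega)] at h; cases h
  refine ⟨hlt, ?_, ?_⟩
  · rw [← List.head?_drop, h, List.head?_cons]
  · rw [← List.drop_drop, h, List.drop_one, List.tail_cons]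

theorem inner_suffix (suf : List Int) : ∀ (t : List Int) (c i x a : Int), 0 ≤ c →
    t.drop c.toNat = suf →
    (PySem.List.pyRange c (t.length : Int) 1).foldl
      (fun naj j =>
        if x + PySem.List.pyGetD t j 0 + 2 * (j - i) > naj then
          x + PySem.List.pyGetD t j 0 + 2 * (j - i) else naj) a
    = innerF x suf (2 * (c - i)) a := by
  induction suf with
  | nil =>
    intro t c i x a hc h
    have hlen : t.length ≤ c.toNat := by
      by_contra hlt
      simp [List.drop_eq_nil_iff] at h; omega
    rw [PySem.List.pyRange_one_eq_nil (by omega)]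
    rfl
  | cons y ys ih =>
    intro t c i x a hc h
    obtain ⟨hlt, hget, hys⟩ := drop_cons_facts h
    have hy : t[c.toNat] = y := by
      rw [List.getElem?_eq_getElem hlt] at hget
      exact Option.some.inj hget
    have hys' : t.drop (c + 1).toNat = ys := by
      rw [show (c + 1).toNat = c.toNat + 1 by omega]; exact hys
    rw [PySem.List.pyRange_one_cons (by omega), List.foldl_cons]
    rw [PySem.List.pyGetD_eq_getElem t (0 : Int) hc (by omega), hy]
    rw [ih t (c + 1) i x _ (by omega) hys']
    show innerF x ys (2 * (c + 1 - i)) (if x + y + 2 * (c - i) > a then x + y + 2 * (c - i) else a)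
      = innerF x (y :: ys) (2 * (c - i)) a
    simp only [innerF]
    congr 1
    · ring
    · rcases le_total a (x + y + 2 * (c - i)) with h | h <;> simp [max_def] <;> omega

-- A's outer loop over i ∈ [c, len t - 1) equals AF on the suffix t.drop c
-- (the last index len-1 of range(0, len(t)) has an empty inner loop; AF on a
--  one-element suffix is likewise the identity, so the len-1 bound is absorbed here)
theorem outer_suffix (suf : List Int) : ∀ (t : List Int) (c a : Int), 0 ≤ c →
    t.drop c.toNat = suf →
    (PySem.List.pyRange c ((t.length : Int) - 1) 1).foldl
      (fun naj i =>
        (PySem.List.pyRange (i + 1) (t.length : Int) 1).foldl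
          (fun naj j =>
            if PySem.List.pyGetD t i 0 + PySem.List.pyGetD t j 0 + 2 * (j - i) > naj then
              PySem.List.pyGetD t i 0 + PySem.List.pyGetD t j 0 + 2 * (j - i) else naj) naj) a
    = AF suf a := by
  induction suf with
  | nil =>
    intro t c a hc h
    have hlen : t.length ≤ c.toNat := by
      by_contra hlt
      simp [List.drop_eq_nil_iff] at h; omega
    rw [PySem.List.pyRange_one_eq_nil (by omega)]
    rfl
  | cons y ys ih =>
    intro t c a hc h
    obtain ⟨hlt, hget, hys⟩ := drop_cons_facts h
    have hy : t[c.toNat] = y := by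
      rw [List.getElem?_eq_getElem hlt] at hget
      exact Option.some.inj hget
    have hys' : t.drop (c + 1).toNat = ys := by
      rw [show (c + 1).toNat = c.toNat + 1 by omega]; exact hys
    have hlensuf : t.length - c.toNat = ys.length + 1 := by
      have := congrArg List.length h
      simp at this; omega
    cases ys with
    | nil =>
      -- c is the last index: range(c, len-1) is empty and AF [y] a = a
      simp only [List.length_nil] at hlensuf
      rw [PySem.List.pyRange_one_eq_nil (by omega)]
      rfl
    | cons y2 ys' =>
      simp only [List.length_cons] at hlensuf
      rw [PySem.List.pyRange_one_cons (by omega), List.foldl_cons]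
      rw [PySem.List.pyGetD_eq_getElem t (0 : Int) hc (by omega), hy]
      rw [inner_suffix (y2 :: ys') t (c + 1) c y a (by omega) hys']
      rw [ih t (c + 1) _ (by omega) hys']
      show AF (y2 :: ys') (innerF y (y2 :: ys') (2 * (c + 1 - c)) a) = AF (y :: y2 :: ys') a
      simp only [AF]
      congr 2
      ring

-- ===== VERDICT (by name: the statement is the Claim_ definition above) =====
theorem neon_spec : Claim_equal_neon := by
  intro t _
  show neon t = neon_alt t
  unfold neon
  rw [show (List.foldl
      (fun naj i =>
        (PySem.List.pyRange (i + 1) (t.length : Int) 1).foldl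
          (fun naj j =>
            let w := PySem.List.pyGetD t i 0 + PySem.List.pyGetD t j 0 + 2 * (j - i)
            if w > naj then w else naj) naj)
      0 (PySem.List.pyRange 0 ((t.length : Int) - 1) 1)) =
    (PySem.List.pyRange 0 ((t.length : Int) - 1) 1).foldl
      (fun naj i =>
        (PySem.List.pyRange (i + 1) (t.length : Int) 1).foldl
          (fun naj j =>
            if PySem.List.pyGetD t i 0 + PySem.List.pyGetD t j 0 + 2 * (j - i) > naj then
              PySem.List.pyGetD t i 0 + PySem.List.pyGetD t j 0 + 2 * (j - i) else naj) naj) 0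
    from rfl]
  rw [outer_suffix t t 0 0 le_rfl (by simp)]
  unfold neon_alt
  rw [B_inv t 0 0 none]
  exact (SS_eq_AF t).symm
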